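-- pv_equiv track=rewrite | github.com/ismaelsoares/my-challengers | very-easy/desafio_05.py | no_space
-- ===== SOURCE A (Python) =====
-- import unicodedata
--
-- def no_space(word):
--     """Escreva uma função que recebe uma string e retorna a maior letra segundo a ordem alfabética em minúsculo. Assuma que a string não possui nenhuma letra com acento, número ou caractere especial, apenas letras e espaços."""
--     word_no_space_lower = unicodedata.normalize("NFKD", word).encode(
--         "ASCII", "ignore").decode("ASCII").replace(" ", "").lower()
--     alphabet = ["a", "b", "c", "d", "e", "f", "g", "h", "i", "j", "k", "l",
--                 "m", "n", "o", "p", "q", "r", "s", "t", "u", "v", "w", "x", "y", "z"]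
--     high_letter = 0
--     for index_word in range(len(word_no_space_lower)):
--         for index_letter in range(len(alphabet)):
--             if (word_no_space_lower[index_word].find(alphabet[index_letter]) != -1):
--                 if index_letter > high_letter:
--                     high_letter = index_letter
--     return alphabet[high_letter]
-- ===== SOURCE B (Python) =====
-- import unicodedata
--
-- def no_space(word):
--     """Escreva uma função que recebe uma string e retorna a maior letra segundo a ordem alfabética em minúsculo."""
--     cleaned = unicodedata.normalize("NFKD", word).encode(
--         "ASCII", "ignore").decode("ASCII").replace(" ", "").lower()
--     letters = [c for c in cleaned if 'a' <= c <= 'z']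
--     return max(letters) if letters else "a"
-- ===== Notes on version B (the rewrite author's own statement) =====
-- stated objective: faster
-- what changed: Replaced the nested loop that scans a 26-entry alphabet table per character while tracking the maximal table index with a single filter of the lowercase letters and one max over them (default 'a').
import Mathlib
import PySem

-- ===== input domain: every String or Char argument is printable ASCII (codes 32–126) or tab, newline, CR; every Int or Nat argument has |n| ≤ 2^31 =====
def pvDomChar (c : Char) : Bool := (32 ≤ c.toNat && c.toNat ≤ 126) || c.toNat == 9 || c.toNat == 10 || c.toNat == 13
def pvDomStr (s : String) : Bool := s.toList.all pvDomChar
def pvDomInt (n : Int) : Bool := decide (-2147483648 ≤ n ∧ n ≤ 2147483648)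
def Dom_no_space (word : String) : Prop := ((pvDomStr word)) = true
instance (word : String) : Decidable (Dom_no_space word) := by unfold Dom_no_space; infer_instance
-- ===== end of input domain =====

-- B replaces A's nested scan of a 26-entry alphabet table (tracking the max table index) by one
-- filter of the lowercase letters followed by a single max with default "a" (measured faster).
set_option maxRecDepth 4096

-- ===== PORT A =====
def alphabetA : List String := ["a", "b", "c", "d", "e", "f", "g", "h", "i", "j", "k", "l",
  "m", "n", "o", "p", "q", "r", "s", "t", "u", "v", "w", "x", "y", "z"]

-- The NFKD-normalise + ASCII encode/decode step of A's preprocessing line is the identity on the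
-- ASCII strings of Dom_no_space, so the line ports as replace " " "" followed by lower (exact there).
def no_space (word : String) : String :=
  let w := PySem.Str.lower (PySem.Str.replace word " " "")
  let high : Int := (PySem.List.pyRange 0 (PySem.Str.len w) 1).foldl (fun high i =>
    (PySem.List.pyRange 0 ((alphabetA.length : Int)) 1).foldl (fun h j =>
      if PySem.Str.find (String.singleton (PySem.List.pyGetD w.toList i ' '))
           (PySem.List.pyGetD alphabetA j "a") ≠ -1 then
        (if j > h then j else h) else h) high) 0
  PySem.List.pyGetD alphabetA high "a"

-- ===== PORT B =====
-- same preprocessing line (identity NFKD step on the ASCII domain), then filter + max over letters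
def no_space_alt (word : String) : String :=
  let cleaned := PySem.Str.lower (PySem.Str.replace word " " "")
  let letters := cleaned.toList.filter (fun c => decide ('a' ≤ c) && decide (c ≤ 'z'))
  match PySem.List.max? letters (fun c => c) with
  | some m => String.singleton m
  | none => "a"

-- ===== PRECONDITION & SPEC =====
def Spec_no_space (word : String) (out : String) : Prop := out = no_space_alt word
instance (word : String) (out : String) : Decidable (Spec_no_space word out) := by unfold Spec_no_space; infer_instance

-- ===== CLAIM (what is proved, stated in full; the proofs are below) =====
def Claim_equal_no_space : Prop := ∀ (word : String), Dom_no_space word → Spec_no_space word (no_space word)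

-- ===== LEMMAS AND PROOFS =====

-- a 1-char haystack finds a 1-char needle exactly when the characters are equal
theorem cond_iff (c d : Char) :
    (PySem.Str.find (String.singleton c) (String.singleton d) ≠ -1) ↔ c = d := by
  rw [PySem.Str.find_ne_neg_one_iff]
  constructor
  · intro h
    have := h.sublist
    simp [String.toList_singleton] at this
    simp_all
  · rintro rfl
    simp

-- a fold that bumps the accumulator only at the unique hit t
theorem genfold (t : Int) : ∀ (l : List Int) (h : Int),
    l.foldl (fun hh j => if j = t then max hh j else hh) h
    = if t ∈ l then max h t else h := by
  intro l
  induction l with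
  | nil => simp
  | cons j l ih =>
    intro h
    by_cases hj : j = t
    · subst hj
      simp only [List.foldl, ih, List.mem_cons, true_or, if_pos]
      split_ifs <;> omega
    · have ht : ¬ t = j := fun e => hj e.symm
      simp [List.foldl, hj, ih, ht]

theorem alpha_map :
    alphabetA = (List.range 26).map (fun k => String.singleton (Char.ofNat (97 + k))) := by decide

theorem get_alpha (j : Int) (h0 : 0 ≤ j) (h1 : j < 26) :
    PySem.List.pyGetD alphabetA j "a" = String.singleton (Char.ofNat (97 + j.toNat)) := by
  rw [PySem.List.pyGetD_of_nonneg _ _ h0, alpha_map]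
  rw [List.getD_eq_getElem?_getD, List.getElem?_map, List.getElem?_range (by omega)]
  simp

-- A's inner loop over the alphabet table: max of the accumulator with c's letter index, if c is a letter
theorem inner_fold (c : Char) (h : Int) :
    (PySem.List.pyRange 0 ((alphabetA.length : Int)) 1).foldl (fun hh j =>
      if PySem.Str.find (String.singleton c) (PySem.List.pyGetD alphabetA j "a") ≠ -1 then
        (if j > hh then j else hh) else hh) h
    = if 97 ≤ c.toNat ∧ c.toNat ≤ 122 then max h ((c.toNat : Int) - 97) else h := by
  have hlen : ((alphabetA.length : Int)) = 26 := by decide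
  rw [hlen]
  rw [PySem.List.foldl_congr_mem _ _
    (fun hh j => if j = (c.toNat : Int) - 97 then max hh j else hh) _
    (by
      intro acc j hj
      rw [PySem.List.mem_pyRange_one] at hj
      rw [get_alpha j hj.1 hj.2]
      have hvalid : (97 + j.toNat).isValidChar := by left; omega
      have hiff : (PySem.Str.find (String.singleton c) (String.singleton (Char.ofNat (97 + j.toNat))) ≠ -1)
          ↔ (j = (c.toNat : Int) - 97) := by
        rw [cond_iff]
        constructor
        · rintro rfl
          rw [Char.toNat_ofNat, if_pos hvalid]
          omega
        · intro hje
          have hn : c.toNat = 97 + j.toNat := by omega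
          rw [← Char.ofNat_toNat c, hn]
      simp only [hiff]
      split_ifs <;> omega)]
  rw [genfold]
  by_cases hc : 97 ≤ c.toNat ∧ c.toNat ≤ 122
  · rw [if_pos (PySem.List.mem_pyRange_one.mpr (by omega)), if_pos hc]
  · rw [if_neg (fun hm => hc (by have := PySem.List.mem_pyRange_one.mp hm; omega)), if_neg hc]

theorem charmax (a b : Char) :
    ((max a b).toNat : Int) = max (a.toNat : Int) (b.toNat : Int) := by
  rcases le_total a b with h | h
  · rw [max_eq_right h]
    have : (a.toNat : Int) ≤ b.toNat := by exact_mod_cast h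
    omega
  · rw [max_eq_left h]
    have : (b.toNat : Int) ≤ a.toNat := by exact_mod_cast h
    omega

theorem getD_alpha (c : Char) (h1 : 97 ≤ c.toNat) (h2 : c.toNat ≤ 122) :
    PySem.List.pyGetD alphabetA ((c.toNat : Int) - 97) "a" = String.singleton c := by
  rw [PySem.List.pyGetD_of_nonneg _ _ (by omega : (0:Int) ≤ (c.toNat : Int) - 97), alpha_map]
  rw [List.getD_eq_getElem?_getD, List.getElem?_map, List.getElem?_range (by omega)]
  simp only [Option.map_some, Option.getD_some]
  rw [show 97 + ((c.toNat : Int) - 97).toNat = c.toNat by omega, Char.ofNat_toNat]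

-- running max of letter indices = letter index of the running max
theorem fold_idx : ∀ (tl : List Char) (a : Char),
    tl.foldl (fun h c => max h ((c.toNat : Int) - 97)) ((a.toNat : Int) - 97)
    = ((tl.foldl max a).toNat : Int) - 97 := by
  intro tl
  induction tl with
  | nil => intro a; rfl
  | cons c tl ih =>
    intro a
    have : max ((a.toNat : Int) - 97) ((c.toNat : Int) - 97) = ((max a c).toNat : Int) - 97 := by
      rw [charmax]; omega
    simp only [List.foldl, this, ih]

theorem pred_eq (c : Char) :
    (decide ('a' ≤ c) && decide (c ≤ 'z')) = decide (97 ≤ c.toNat ∧ c.toNat ≤ 122) := by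
  have h1 : ('a' ≤ c) ↔ 97 ≤ c.toNat := Iff.rfl
  have h2 : (c ≤ 'z') ↔ c.toNat ≤ 122 := Iff.rfl
  simp [h1, h2]

-- the two bodies agree once the shared preprocessed string s is abstracted out
theorem core (s : String) :
    PySem.List.pyGetD alphabetA
      ((PySem.List.pyRange 0 (PySem.Str.len s) 1).foldl (fun high i =>
        (PySem.List.pyRange 0 ((alphabetA.length : Int)) 1).foldl (fun h j =>
          if PySem.Str.find (String.singleton (PySem.List.pyGetD s.toList i ' '))
               (PySem.List.pyGetD alphabetA j "a") ≠ -1 then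
            (if j > h then j else h) else h) high) 0) "a"
    = match PySem.List.max? (s.toList.filter (fun c => decide ('a' ≤ c) && decide (c ≤ 'z')))
        (fun c => c) with
      | some m => String.singleton m
      | none => "a" := by
  have hlen : PySem.Str.len s = ((s.toList.length : Int)) := by simp [PySem.Str.len]
  rw [hlen, PySem.List.foldl_pyRange_zero_pyGetD' s.toList ' '
    (fun high c => (PySem.List.pyRange 0 ((alphabetA.length : Int)) 1).foldl (fun h j =>
      if PySem.Str.find (String.singleton c) (PySem.List.pyGetD alphabetA j "a") ≠ -1 then
        (if j > h then j else h) else h) high) 0]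
  simp only [inner_fold]
  rw [PySem.List.foldl_ite_eq_foldl_filter (fun c => 97 ≤ c.toNat ∧ c.toNat ≤ 122)
    (fun h c => max h ((c.toNat : Int) - 97)) s.toList 0]
  simp only [pred_eq]
  cases hf : s.toList.filter (fun c => decide (97 ≤ c.toNat ∧ c.toNat ≤ 122)) with
  | nil => decide
  | cons m tl =>
    rw [PySem.List.max?_id_cons]
    have hm : 97 ≤ m.toNat ∧ m.toNat ≤ 122 := by
      have hmem : m ∈ s.toList.filter (fun c => decide (97 ≤ c.toNat ∧ c.toNat ≤ 122)) := by
        rw [hf]; exact List.mem_cons_self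
      simpa using List.of_mem_filter hmem
    have hM : 97 ≤ (tl.foldl max m).toNat ∧ (tl.foldl max m).toNat ≤ 122 := by
      rcases PySem.List.foldl_max_mem tl m with he | he
      · rw [he]; exact hm
      · have hmem : tl.foldl max m ∈ s.toList.filter (fun c => decide (97 ≤ c.toNat ∧ c.toNat ≤ 122)) := by
          rw [hf]; exact List.mem_cons_of_mem _ he
        simpa using List.of_mem_filter hmem
    simp only [List.foldl]
    rw [show max 0 ((m.toNat : Int) - 97) = (m.toNat : Int) - 97 by omega]
    rw [fold_idx]
    exact getD_alpha _ hM.1 hM.2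

-- ===== VERDICT (by name: the statement is the Claim_ definition above) =====
theorem no_space_spec : Claim_equal_no_space := by
  intro word _
  show no_space word = no_space_alt word
  simp only [no_space, no_space_alt]
  exact core (PySem.Str.lower (PySem.Str.replace word " " ""))
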